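-- pv_equiv track=rewrite | github.com/krinkin/unit-gap | src/tropical.py | tropical_transition_matrix
-- ===== SOURCE A (Python) =====
-- def all_and_decompositions(f_tt: int, n_inputs: int, opt_data: dict[int, int]) -> list[dict]:
--     """Find all AND/NAND decompositions of f into known functions.
--
--     For f = AND(a, b) or f = NAND(a, b), enumerate all (a, b) pairs
--     where both a and b have known optimal cost.
--
--     Returns list of dicts with keys: a_tt, b_tt, opt_a, opt_b, tree_cost, is_nand.
--     """
--     n_rows = 1 << n_inputs
--     mask = (1 << n_rows) - 1
--
--     decomps = []
--
--     for is_nand in [False, True]: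
--         target = f_tt if not is_nand else (f_tt ^ mask)
--
--         for a_tt, opt_a in opt_data.items():
--             # a & b = target means target must be a subset of a (bitwise)
--             if (a_tt & target) != target:
--                 continue
--
--             # b can have target's 1-bits plus any bits where a is 0
--             free_mask = (~a_tt) & mask
--             subset = 0
--             while True:
--                 b_tt = target | subset
--                 if b_tt in opt_data:
--                     opt_b = opt_data[b_tt]
--                     tree_cost = 1 + opt_a + opt_b
--                     decomps.append({
--                         'a_tt': a_tt,
--                         'b_tt': b_tt,
--                         'opt_a': opt_a,
--                         'opt_b': opt_b,
--                         'tree_cost': tree_cost,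
--                         'is_nand': is_nand,
--                     })
--
--                 if subset == free_mask:
--                     break
--                 subset = (subset - free_mask) & free_mask
--
--     return decomps
--
-- def tropical_transition_matrix(n_inputs: int, opt_data: dict[int, int]) -> dict[int, list[tuple[int, int, int]]]:
--     """Build the tropical transition structure.
--
--     For each function f, list all (a, b, cost) triples where
--     f = AND(a, b) or NAND(a, b) and cost = 1 + opt(a) + opt(b).
--
--     This is the adjacency structure of the tropical "Bellman graph".
--     """
--     n_rows = 1 << n_inputs
--     mask = (1 << n_rows) - 1
--     transitions: dict[int, list[tuple[int, int, int]]] = {}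
--
--     for f_tt in opt_data:
--         decomps = all_and_decompositions(f_tt, n_inputs, opt_data)
--         transitions[f_tt] = [(d['a_tt'], d['b_tt'], d['tree_cost']) for d in decomps]
--
--     return transitions
-- ===== SOURCE B (Python) =====
-- def tropical_transition_matrix(n_inputs: int, opt_data: dict[int, int]) -> dict[int, list[tuple[int, int, int]]]:
--     """Same transition structure, but the b-operand is found by scanning the sorted
--     key list for b with b & a == target (and b's bits outside the mask equal to
--     target's), instead of enumerating every submask of ~a & mask."""
--     n_rows = 1 << n_inputs
--     mask = (1 << n_rows) - 1
--     keys_sorted = sorted(opt_data)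
--     transitions: dict[int, list[tuple[int, int, int]]] = {}
--     for f_tt in opt_data:
--         triples = []
--         for is_nand in (False, True):
--             target = f_tt ^ mask if is_nand else f_tt
--             for a_tt, opt_a in opt_data.items():
--                 if a_tt & target != target:
--                     continue
--                 for b_tt in keys_sorted:
--                     if b_tt & a_tt == target and b_tt | mask == target | mask:
--                         triples.append((a_tt, b_tt, 1 + opt_a + opt_data[b_tt]))
--         transitions[f_tt] = triples
--     return transitions
-- ===== Notes on version B (the rewrite author's own statement) =====
-- stated objective: alternative
-- what changed: For each (f, a, AND/NAND) combination B collects the b-operands by scanning the sorted key list once, keeping keys with b & a == target whose bits outside the mask equal target's, instead of A's walk over every submask of ~a & mask with a dict probe per submask.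
import Mathlib
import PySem

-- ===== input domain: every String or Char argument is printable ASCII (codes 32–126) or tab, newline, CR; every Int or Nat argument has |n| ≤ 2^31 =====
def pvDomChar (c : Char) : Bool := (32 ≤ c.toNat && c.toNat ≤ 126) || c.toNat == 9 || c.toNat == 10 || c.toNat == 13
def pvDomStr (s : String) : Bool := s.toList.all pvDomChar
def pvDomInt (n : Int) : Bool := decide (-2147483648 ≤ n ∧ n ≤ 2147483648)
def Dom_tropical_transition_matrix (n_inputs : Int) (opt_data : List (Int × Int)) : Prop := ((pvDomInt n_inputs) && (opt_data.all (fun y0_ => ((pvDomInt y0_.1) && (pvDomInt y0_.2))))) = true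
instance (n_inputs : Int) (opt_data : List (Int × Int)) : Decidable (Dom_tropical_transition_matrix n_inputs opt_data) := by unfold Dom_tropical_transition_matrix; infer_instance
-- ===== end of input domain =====

-- B lists the valid second operands b by scanning the sorted key list (b & a == target and
-- b's bits outside the mask equal target's) instead of enumerating every submask of ~a & mask
-- with a dict probe per submask (objective: alternative algorithm).

-- ===== PORT A =====
-- `n_rows = 1 << n_inputs` and `mask = (1 << n_rows) - 1` (computed identically at the top
-- of both Python functions)
def pvNRows (n_inputs : Int) : Int := 1 <<< n_inputs.toNat
def pvMaskOf (n_inputs : Int) : Int := (1 <<< (pvNRows n_inputs).toNat) - 1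

-- the inner `while True` submask walk of all_and_decompositions; the Nat fuel only makes
-- the recursion structural (the walk exits on subset == free_mask first; fuel free.toNat+1
-- always suffices, proved in pvSubLoopF_eq below)
def pvSubLoopF (d : PySem.Dict Int Int) (is_nand : Bool) (target a_tt opt_a free : Int) :
    Nat → Int → List (Int × Int × Int × Int × Int × Bool) →
      List (Int × Int × Int × Int × Int × Bool)
  | 0, _, acc => acc
  | Nat.succ n, s, acc =>
    let b := PySem.Int.bor target s
    let acc' := if d.contains b then
        acc ++ [(a_tt, b, opt_a, d.getD b 0, 1 + opt_a + d.getD b 0, is_nand)]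
      else acc
    if s = free then acc'
    else pvSubLoopF d is_nand target a_tt opt_a free n (PySem.Int.band (s - free) free) acc'

def pvAllAndDecomps (f_tt : Int) (n_inputs : Int) (d : PySem.Dict Int Int) :
    List (Int × Int × Int × Int × Int × Bool) :=
  let mask : Int := pvMaskOf n_inputs
  [false, true].foldl (fun dec is_nand =>
    let target := if is_nand then PySem.Int.bxor f_tt mask else f_tt
    d.items.foldl (fun dec p =>
      if PySem.Int.band p.1 target ≠ target then dec
      else pvSubLoopF d is_nand target p.1 p.2 (PySem.Int.band (Int.not p.1) mask)
        ((PySem.Int.band (Int.not p.1) mask).toNat + 1) 0 dec) dec) []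

def tropical_transition_matrix (n_inputs : Int) (opt_data : List (Int × Int)) :
    List (Int × List (Int × Int × Int)) :=
  let d := PySem.Dict.ofList opt_data
  let transitions := d.keys.foldl (fun tr f_tt =>
    tr.insert f_tt ((pvAllAndDecomps f_tt n_inputs d).map (fun e => (e.1, e.2.1, e.2.2.2.2.1))))
    PySem.Dict.empty
  transitions.items

-- ===== PORT B =====
def tropical_transition_matrix_alt (n_inputs : Int) (opt_data : List (Int × Int)) :
    List (Int × List (Int × Int × Int)) :=
  let d := PySem.Dict.ofList opt_data
  let mask : Int := pvMaskOf n_inputs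
  let keys_sorted := PySem.List.sorted d.keys (fun x => x) false
  let transitions := d.keys.foldl (fun tr f_tt =>
    let triples := [false, true].foldl (fun acc is_nand =>
      let target := if is_nand then PySem.Int.bxor f_tt mask else f_tt
      d.items.foldl (fun acc p =>
        if PySem.Int.band p.1 target ≠ target then acc
        else keys_sorted.foldl (fun acc b =>
          if PySem.Int.band b p.1 == target && PySem.Int.bor b mask == PySem.Int.bor target mask
          then acc ++ [(p.1, b, 1 + p.2 + d.getD b 0)] else acc) acc) acc) []
    tr.insert f_tt triples) PySem.Dict.empty
  transitions.items

-- ===== PRECONDITION & SPEC =====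
-- Pre_ excludes exactly the inputs where Python raises: n_inputs < 0 makes `1 << n_inputs`
-- raise ValueError, and n_inputs ≥ 63 makes `1 << n_rows` (shift count 2^n_inputs ≥ 2^63)
-- raise OverflowError.
def Pre_tropical_transition_matrix (n_inputs : Int) (opt_data : List (Int × Int)) : Prop :=
  0 ≤ n_inputs ∧ n_inputs < 63
instance (n_inputs : Int) (opt_data : List (Int × Int)) : Decidable (Pre_tropical_transition_matrix n_inputs opt_data) := by unfold Pre_tropical_transition_matrix; infer_instance

def pvWitness_tropical_transition_matrix : Int × (List (Int × Int)) := (1, [(0, 0), (3, 1), (2, 1)])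

def Spec_tropical_transition_matrix (n_inputs : Int) (opt_data : List (Int × Int)) (out : List (Int × List (Int × Int × Int))) : Prop := out = tropical_transition_matrix_alt n_inputs opt_data
instance (n_inputs : Int) (opt_data : List (Int × Int)) (out : List (Int × List (Int × Int × Int))) : Decidable (Spec_tropical_transition_matrix n_inputs opt_data out) := by unfold Spec_tropical_transition_matrix; infer_instance

-- ===== CLAIM (what is proved, stated in full; the proofs are below) =====
def Claim_equal_tropical_transition_matrix : Prop := ∀ (n_inputs : Int) (opt_data : List (Int × Int)), Dom_tropical_transition_matrix n_inputs opt_data → Pre_tropical_transition_matrix n_inputs opt_data → Spec_tropical_transition_matrix n_inputs opt_data (tropical_transition_matrix n_inputs opt_data)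

-- ===== LEMMAS AND PROOFS =====

theorem pv_and_mod_two (a b : Nat) : (a &&& b) % 2 = (a % 2) &&& (b % 2) := by
  rw [← Nat.and_one_is_mod (a &&& b), ← Nat.and_one_is_mod a, ← Nat.and_one_is_mod b]
  apply Nat.eq_of_testBit_eq
  intro i
  simp only [Nat.testBit_and]
  cases a.testBit i <;> cases b.testBit i <;> cases (1:Nat).testBit i <;> rfl

theorem pv_and_decomp (a b : Nat) : a &&& b = 2 * (a/2 &&& b/2) + ((a % 2) &&& (b % 2)) := by
  have h1 : (a &&& b) / 2 = a/2 &&& b/2 := Nat.and_div_two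
  have h2 := pv_and_mod_two a b
  omega

theorem pv_sub_and_self (f : Nat) : ∀ s, s &&& f = s → (f - s) &&& f = f - s := by
  induction f using Nat.strong_induction_on with
  | _ f IH =>
  intro s hs
  rcases Nat.eq_zero_or_pos f with hf | hf
  · subst hf; simp
  have hd := pv_and_decomp s f
  have hle1 : s/2 &&& f/2 ≤ s/2 := Nat.and_le_left
  have hle2 : (s % 2) &&& (f % 2) ≤ s % 2 := Nat.and_le_left
  have h1 : s/2 &&& f/2 = s/2 := by omega
  have h2 : (s % 2) &&& (f % 2) = s % 2 := by omega
  have hsle2 : s/2 ≤ f/2 := h1 ▸ Nat.and_le_right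
  have hsle : s ≤ f := hs ▸ Nat.and_le_right
  have hc_imp : s % 2 = 1 → f % 2 = 1 := by
    intro hc
    rcases Nat.mod_two_eq_zero_or_one f with h | h
    · rw [hc, h] at h2; simp at h2
    · exact h
  have hd2 := pv_and_decomp (f - s) f
  have hIH : (f/2 - s/2) &&& f/2 = f/2 - s/2 := IH (f/2) (by omega) (s/2) h1
  rcases Nat.mod_two_eq_zero_or_one s with hcs | hcs
  · rcases Nat.mod_two_eq_zero_or_one f with hcf | hcf
    · have hq : (f - s)/2 = f/2 - s/2 := by omega
      have hr : (f - s) % 2 = 0 := by omega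
      rw [hq, hr, hcf] at hd2
      simp at hd2
      omega
    · have hq : (f - s)/2 = f/2 - s/2 := by omega
      have hr : (f - s) % 2 = 1 := by omega
      rw [hq, hr, hcf] at hd2
      simp at hd2
      omega
  · have hcf := hc_imp hcs
    have hq : (f - s)/2 = f/2 - s/2 := by omega
    have hr : (f - s) % 2 = 0 := by omega
    rw [hq, hr, hcf] at hd2
    simp at hd2
    omega

theorem pv_nat_succ (F : Nat) : ∀ S, S &&& F = S → S < F →
    (F - (F &&& (F - S - 1))) &&& F = F - (F &&& (F - S - 1)) ∧
    S < F - (F &&& (F - S - 1)) ∧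
    ∀ T, T &&& F = T → S < T → F - (F &&& (F - S - 1)) ≤ T := by
  induction F using Nat.strong_induction_on with
  | _ F IH =>
  intro S hS hlt
  have hpos : 0 < F := by omega
  have hdS := pv_and_decomp S F
  have hle1 : S/2 &&& F/2 ≤ S/2 := Nat.and_le_left
  have hle2 : (S % 2) &&& (F % 2) ≤ S % 2 := Nat.and_le_left
  have h1 : S/2 &&& F/2 = S/2 := by omega
  have h2 : (S % 2) &&& (F % 2) = S % 2 := by omega
  have hsle2 : S/2 ≤ F/2 := h1 ▸ Nat.and_le_right
  have hc_imp : S % 2 = 1 → F % 2 = 1 := by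
    intro hc
    rcases Nat.mod_two_eq_zero_or_one F with h | h
    · rw [hc, h] at h2; simp at h2
    · exact h
  have hdE := pv_and_decomp F (F - S - 1)
  have hgle : F/2 &&& ((F - S - 1)/2) ≤ F/2 := Nat.and_le_left
  have hTdec : ∀ T, T &&& F = T → T/2 &&& F/2 = T/2 ∧ (T % 2) &&& (F % 2) = T % 2 := by
    intro T hT
    have hd := pv_and_decomp T F
    have : T/2 &&& F/2 ≤ T/2 := Nat.and_le_left
    have : (T % 2) &&& (F % 2) ≤ T % 2 := Nat.and_le_left
    constructor <;> omega
  rcases Nat.mod_two_eq_zero_or_one S with hcs | hcs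
  · rcases Nat.mod_two_eq_zero_or_one F with hcf | hcf
    · have hlt2 : S/2 < F/2 := by omega
      have hq : (F - S - 1)/2 = F/2 - S/2 - 1 := by omega
      have hr : (F - S - 1) % 2 = 1 := by omega
      rw [hq, hr, hcf] at hdE
      simp at hdE
      obtain ⟨ia, ib, ic⟩ := IH (F/2) (by omega) (S/2) h1 hlt2
      have hgle' : F/2 &&& (F/2 - S/2 - 1) ≤ F/2 := Nat.and_le_left
      refine ⟨?_, by omega, ?_⟩
      · have hd3 := pv_and_decomp (F - (F &&& (F - S - 1))) F
        have hq3 : (F - (F &&& (F - S - 1)))/2 = F/2 - (F/2 &&& (F/2 - S/2 - 1)) := by omega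
        have hr3 : (F - (F &&& (F - S - 1))) % 2 = 0 := by omega
        rw [hq3, hr3, hcf] at hd3
        simp at hd3
        omega
      · intro T hT hST
        obtain ⟨hT1, hT2⟩ := hTdec T hT
        rw [hcf] at hT2
        simp at hT2
        have : S/2 < T/2 := by omega
        have := ic (T/2) hT1 this
        omega
    · have hq : (F - S - 1)/2 = F/2 - S/2 := by omega
      have hr : (F - S - 1) % 2 = 0 := by omega
      rw [hq, hr, hcf] at hdE
      simp at hdE
      have hsub : (F/2 - S/2) &&& F/2 = F/2 - S/2 := pv_sub_and_self (F/2) (S/2) h1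
      have hcomm : F/2 &&& (F/2 - S/2) = F/2 - S/2 := by rw [Nat.and_comm]; exact hsub
      have hS' : F - (F &&& (F - S - 1)) = S + 1 := by omega
      rw [hS']
      refine ⟨?_, by omega, by omega⟩
      have hd3 := pv_and_decomp (S + 1) F
      have hq3 : (S + 1)/2 = S/2 := by omega
      have hr3 : (S + 1) % 2 = 1 := by omega
      rw [hq3, hr3, hcf] at hd3
      simp at hd3
      omega
  · have hcf := hc_imp hcs
    have hlt2 : S/2 < F/2 := by omega
    have hq : (F - S - 1)/2 = F/2 - S/2 - 1 := by omega
    have hr : (F - S - 1) % 2 = 1 := by omega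
    rw [hq, hr, hcf] at hdE
    simp at hdE
    obtain ⟨ia, ib, ic⟩ := IH (F/2) (by omega) (S/2) h1 hlt2
    have hgle' : F/2 &&& (F/2 - S/2 - 1) ≤ F/2 := Nat.and_le_left
    refine ⟨?_, by omega, ?_⟩
    · have hd3 := pv_and_decomp (F - (F &&& (F - S - 1))) F
      have hq3 : (F - (F &&& (F - S - 1)))/2 = F/2 - (F/2 &&& (F/2 - S/2 - 1)) := by omega
      have hr3 : (F - (F &&& (F - S - 1))) % 2 = 0 := by omega
      rw [hq3, hr3, hcf] at hd3
      simp at hd3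
      omega
    · intro T hT hST
      obtain ⟨hT1, hT2⟩ := hTdec T hT
      have : S/2 < T/2 := by omega
      have := ic (T/2) hT1 this
      omega

theorem pv_mask_nonneg (k : Nat) : 0 ≤ ((1 : Int) <<< k) - 1 := by
  rw [Int.shiftLeft_eq]
  have h : (0 : Int) < 2 ^ k := pow_pos (by norm_num) k
  linarith

theorem pv_band_nonneg_right (a b : Int) (hb : 0 ≤ b) : 0 ≤ PySem.Int.band a b := by
  rw [PySem.Int.band_comm]
  exact PySem.Int.band_nonneg_of_nonneg_left a hb

theorem pv_band_zero_left (b : Int) : PySem.Int.band 0 b = 0 := by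
  rw [PySem.Int.band_comm]
  exact PySem.Int.band_zero b

theorem pv_subset_bounds (s free : Int) (hf : 0 ≤ free) (hs : PySem.Int.band s free = s) :
    0 ≤ s ∧ s ≤ free := by
  have h0 : 0 ≤ s := hs ▸ pv_band_nonneg_right s free hf
  have hb := PySem.Int.band_of_nonneg h0 hf
  rw [hs] at hb
  have hle : s.toNat &&& free.toNat ≤ free.toNat := Nat.and_le_right
  omega

theorem pv_subset_toNat (s free : Int) (hf : 0 ≤ free) (hs : PySem.Int.band s free = s) :
    s.toNat &&& free.toNat = s.toNat := by
  obtain ⟨h0, _⟩ := pv_subset_bounds s free hf hs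
  have hb := PySem.Int.band_of_nonneg h0 hf
  rw [hs] at hb
  omega

theorem pv_band_step_eval (s free : Int) (h0 : 0 ≤ s) (hlt : s < free) :
    PySem.Int.band (s - free) free =
      ((free.toNat - (free.toNat &&& (free.toNat - s.toNat - 1)) : Nat) : Int) := by
  simp only [PySem.Int.band]
  rw [if_neg (by omega), if_pos (by omega)]
  have h1 : (-(s - free) - 1).toNat = free.toNat - s.toNat - 1 := by omega
  rw [h1]

theorem pv_succ (free s : Int) (hf : 0 ≤ free) (hs : PySem.Int.band s free = s)
    (hne : s ≠ free) :
    PySem.Int.band (PySem.Int.band (s - free) free) free = PySem.Int.band (s - free) free ∧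
    s < PySem.Int.band (s - free) free ∧
    PySem.Int.band (s - free) free ≤ free ∧
    (∀ t, PySem.Int.band t free = t → s < t → PySem.Int.band (s - free) free ≤ t) := by
  obtain ⟨h0, hle⟩ := pv_subset_bounds s free hf hs
  have hlt : s < free := lt_of_le_of_ne hle hne
  have hN := pv_subset_toNat s free hf hs
  have hltN : s.toNat < free.toNat := by omega
  obtain ⟨na, nb, nc⟩ := pv_nat_succ free.toNat s.toNat hN hltN
  have heval := pv_band_step_eval s free h0 hlt
  rw [heval]
  have hgle : free.toNat &&& (free.toNat - s.toNat - 1) ≤ free.toNat := Nat.and_le_left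
  refine ⟨?_, by omega, by omega, ?_⟩
  · rw [PySem.Int.band_of_nonneg (by positivity) hf]
    rw [Int.toNat_natCast]
    rw [na]
  · intro t ht hst
    obtain ⟨ht0, _⟩ := pv_subset_bounds t free hf ht
    have htN := pv_subset_toNat t free hf ht
    have := nc t.toNat htN (by omega)
    omega

theorem pvMaskOf_nonneg (n_inputs : Int) : 0 ≤ pvMaskOf n_inputs :=
  pv_mask_nonneg _


theorem pv_or_mod_two (a b : Nat) : (a ||| b) % 2 = (a % 2) ||| (b % 2) := by
  rw [← Nat.and_one_is_mod (a ||| b), ← Nat.and_one_is_mod a, ← Nat.and_one_is_mod b]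
  apply Nat.eq_of_testBit_eq
  intro i
  simp only [Nat.testBit_and, Nat.testBit_or]
  cases a.testBit i <;> cases b.testBit i <;> cases (1:Nat).testBit i <;> rfl

theorem pv_or_decomp (a b : Nat) : a ||| b = 2 * (a/2 ||| b/2) + ((a % 2) ||| (b % 2)) := by
  have h1 : (a ||| b) / 2 = a/2 ||| b/2 := Nat.or_div_two
  have h2 := pv_or_mod_two a b
  omega

theorem pv_disjoint_add (a : Nat) : ∀ b, a &&& b = 0 → a + b = a ||| b := by
  induction a using Nat.strong_induction_on with
  | _ a IH =>
  intro b hab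
  rcases Nat.eq_zero_or_pos a with ha | ha
  · subst ha; simp
  have hd := pv_and_decomp a b
  have hdo := pv_or_decomp a b
  have hle1 : (0:Nat) ≤ a/2 &&& b/2 := Nat.zero_le _
  have h1 : a/2 &&& b/2 = 0 := by omega
  have h2 : (a % 2) &&& (b % 2) = 0 := by omega
  have hIH := IH (a/2) (by omega) (b/2) h1
  have hbit : (a % 2) ||| (b % 2) = a % 2 + b % 2 := by
    have ha2 := Nat.mod_two_eq_zero_or_one a
    have hb2 := Nat.mod_two_eq_zero_or_one b
    rcases ha2 with h | h <;> rcases hb2 with h' | h' <;> rw [h, h'] at h2 ⊢ <;> simp_all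
  omega

theorem pv_xor_mod_two (a b : Nat) : (a ^^^ b) % 2 = (a % 2) ^^^ (b % 2) := by
  rw [← Nat.and_one_is_mod (a ^^^ b), ← Nat.and_one_is_mod a, ← Nat.and_one_is_mod b]
  apply Nat.eq_of_testBit_eq
  intro i
  simp only [Nat.testBit_and, Nat.testBit_xor]
  cases a.testBit i <;> cases b.testBit i <;> cases (1:Nat).testBit i <;> rfl

theorem pv_xor_decomp (a b : Nat) : a ^^^ b = 2 * (a/2 ^^^ b/2) + ((a % 2) ^^^ (b % 2)) := by
  have h1 : (a ^^^ b) / 2 = a/2 ^^^ b/2 := Nat.xor_div_two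
  have h2 := pv_xor_mod_two a b
  omega

theorem pv_xor_sub (a : Nat) : ∀ b, b &&& a = b → a ^^^ b = a - b := by
  induction a using Nat.strong_induction_on with
  | _ a IH =>
  intro b hb
  rcases Nat.eq_zero_or_pos a with ha | ha
  · subst ha
    have : b &&& 0 = 0 := by simp
    simp_all
  have hd := pv_and_decomp b a
  have hle1 : b/2 &&& a/2 ≤ b/2 := Nat.and_le_left
  have hle2 : (b % 2) &&& (a % 2) ≤ b % 2 := Nat.and_le_left
  have h1 : b/2 &&& a/2 = b/2 := by omega
  have h2 : (b % 2) &&& (a % 2) = b % 2 := by omega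
  have hble : b/2 ≤ a/2 := h1 ▸ Nat.and_le_right
  have hdx := pv_xor_decomp a b
  have hIH := IH (a/2) (by omega) (b/2) h1
  have hbit : (a % 2) ^^^ (b % 2) = a % 2 - b % 2 := by
    have ha2 := Nat.mod_two_eq_zero_or_one a
    have hb2 := Nat.mod_two_eq_zero_or_one b
    rcases ha2 with h | h <;> rcases hb2 with h' | h' <;> rw [h, h'] at h2 ⊢ <;> simp_all
  have hble2 : b % 2 ≤ a % 2 := by
    have ha2 := Nat.mod_two_eq_zero_or_one a
    have hb2 := Nat.mod_two_eq_zero_or_one b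
    rcases ha2 with h | h <;> rcases hb2 with h' | h' <;> rw [h, h'] at h2 <;> simp_all
  omega

theorem pv_ldiff_eq_sub (n m : Nat) : n.ldiff m = n - (n &&& m) := by
  have h1 : n.ldiff m = n ^^^ (n &&& m) := by
    apply Nat.eq_of_testBit_eq
    intro i
    simp only [Nat.testBit_ldiff, Nat.testBit_xor, Nat.testBit_and]
    cases n.testBit i <;> cases m.testBit i <;> rfl
  have h2 : (n &&& m) &&& n = n &&& m := by
    apply Nat.eq_of_testBit_eq
    intro i
    simp only [Nat.testBit_and]
    cases n.testBit i <;> cases m.testBit i <;> rfl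
  rw [h1, pv_xor_sub n (n &&& m) h2]

theorem pv_band_eq_land (a b : Int) : PySem.Int.band a b = Int.land a b := by
  cases a with
  | ofNat m =>
    cases b with
    | ofNat n => simp [PySem.Int.band, Int.land]
    | negSucc n =>
      simp only [PySem.Int.band, Int.land, Int.ofNat_eq_natCast, Int.negSucc_eq]
      rw [if_pos (by omega), if_neg (by omega)]
      have h1 : (- -((n:Int) + 1) - 1).toNat = n := by omega
      have h2 : ((m:Int)).toNat = m := by omega
      rw [h1, h2, pv_ldiff_eq_sub]
  | negSucc m =>
    cases b with
    | ofNat n =>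
      simp only [PySem.Int.band, Int.land, Int.ofNat_eq_natCast, Int.negSucc_eq]
      rw [if_neg (by omega), if_pos (by omega)]
      have h1 : (- -((m:Int) + 1) - 1).toNat = m := by omega
      have h2 : ((n:Int)).toNat = n := by omega
      rw [h1, h2, pv_ldiff_eq_sub]
    | negSucc n =>
      simp only [PySem.Int.band, Int.land, Int.ofNat_eq_natCast, Int.negSucc_eq]
      rw [if_neg (by omega), if_neg (by omega)]
      have h1 : (- -((m:Int) + 1) - 1).toNat = m := by omega
      have h2 : (- -((n:Int) + 1) - 1).toNat = n := by omega
      rw [h1, h2]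
      omega

theorem pv_bor_eq_lor (a b : Int) : PySem.Int.bor a b = Int.lor a b := by
  cases a with
  | ofNat m =>
    cases b with
    | ofNat n => simp [PySem.Int.bor, Int.lor]
    | negSucc n =>
      simp only [PySem.Int.bor, Int.lor, Int.ofNat_eq_natCast, Int.negSucc_eq]
      rw [if_pos (by omega), if_neg (by omega)]
      have h1 : (- -((n:Int) + 1) - 1).toNat = n := by omega
      have h2 : ((m:Int)).toNat = m := by omega
      rw [h1, h2, pv_ldiff_eq_sub]
      have h3 : n &&& m ≤ n := Nat.and_le_left
      omega
  | negSucc m =>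
    cases b with
    | ofNat n =>
      simp only [PySem.Int.bor, Int.lor, Int.ofNat_eq_natCast, Int.negSucc_eq]
      rw [if_neg (by omega), if_pos (by omega)]
      have h1 : (- -((m:Int) + 1) - 1).toNat = m := by omega
      have h2 : ((n:Int)).toNat = n := by omega
      rw [h1, h2, pv_ldiff_eq_sub]
      have h3 : m &&& n ≤ m := Nat.and_le_left
      omega
    | negSucc n =>
      simp only [PySem.Int.bor, Int.lor, Int.ofNat_eq_natCast, Int.negSucc_eq]
      rw [if_neg (by omega), if_neg (by omega)]
      have h1 : (- -((m:Int) + 1) - 1).toNat = m := by omega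
      have h2 : (- -((n:Int) + 1) - 1).toNat = n := by omega
      rw [h1, h2]
      omega

theorem pv_testBit_band (a b : Int) (i : Nat) :
    (PySem.Int.band a b).testBit i = (a.testBit i && b.testBit i) := by
  rw [pv_band_eq_land]; exact Int.testBit_land a b i

theorem pv_testBit_bor (a b : Int) (i : Nat) :
    (PySem.Int.bor a b).testBit i = (a.testBit i || b.testBit i) := by
  rw [pv_bor_eq_lor]; exact Int.testBit_lor a b i

theorem pv_testBit_not (a : Int) (i : Nat) : (Int.not a).testBit i = !(a.testBit i) := by
  cases a <;> simp [Int.not, Int.testBit]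

theorem pv_testBit_zero_int (i : Nat) : (0 : Int).testBit i = false := by
  simp [Int.testBit]

theorem pv_int_ext {x y : Int} (h : ∀ i, x.testBit i = y.testBit i) : x = y := by
  cases x with
  | ofNat m =>
    cases y with
    | ofNat n =>
      have : m = n := Nat.eq_of_testBit_eq (fun i => h i)
      simp [this]
    | negSucc n =>
      exfalso
      have hi := h (m + n)
      have h1 : m.testBit (m + n) = false :=
        Nat.testBit_lt_two_pow (lt_of_lt_of_le (Nat.lt_two_pow_self) (Nat.pow_le_pow_right (by omega) (by omega)))
      have h2 : n.testBit (m + n) = false :=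
        Nat.testBit_lt_two_pow (lt_of_lt_of_le (Nat.lt_two_pow_self) (Nat.pow_le_pow_right (by omega) (by omega)))
      simp [Int.testBit, h1, h2] at hi
  | negSucc m =>
    cases y with
    | ofNat n =>
      exfalso
      have hi := h (m + n)
      have h1 : m.testBit (m + n) = false :=
        Nat.testBit_lt_two_pow (lt_of_lt_of_le (Nat.lt_two_pow_self) (Nat.pow_le_pow_right (by omega) (by omega)))
      have h2 : n.testBit (m + n) = false :=
        Nat.testBit_lt_two_pow (lt_of_lt_of_le (Nat.lt_two_pow_self) (Nat.pow_le_pow_right (by omega) (by omega)))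
      simp [Int.testBit, h1, h2] at hi
    | negSucc n =>
      have : m = n := Nat.eq_of_testBit_eq (fun i => by
        have := h i; simpa [Int.testBit] using this)
      simp [this]

theorem pv_bor_add (t s : Int) (hs0 : 0 ≤ s) (hd : PySem.Int.band t s = 0) :
    PySem.Int.bor t s = t + s := by
  rcases le_or_gt 0 t with ht | ht
  · rw [PySem.Int.band_of_nonneg ht hs0] at hd
    have hdn : t.toNat &&& s.toNat = 0 := by omega
    rw [PySem.Int.bor_of_nonneg ht hs0]
    have := pv_disjoint_add t.toNat s.toNat hdn
    omega
  · have hnott : ¬ (0 ≤ t) := by omega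
    simp only [PySem.Int.band] at hd
    rw [if_neg hnott, if_pos hs0] at hd
    have hd' : s.toNat - (s.toNat &&& (-t - 1).toNat) = 0 := by omega
    have hle : s.toNat &&& (-t - 1).toNat ≤ s.toNat := Nat.and_le_left
    have hsub : s.toNat &&& (-t - 1).toNat = s.toNat := by omega
    simp only [PySem.Int.bor]
    rw [if_neg hnott, if_pos hs0]
    have hcomm : (-t - 1).toNat &&& s.toNat = s.toNat := by rw [Nat.and_comm]; exact hsub
    rw [hcomm]
    have hsu : s.toNat ≤ (-t - 1).toNat := hsub ▸ Nat.and_le_right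
    omega

theorem pv_target_disj (a target mask : Int) (ha : PySem.Int.band a target = target) :
    ∀ s, PySem.Int.band s (PySem.Int.band (Int.not a) mask) = s →
      PySem.Int.band target s = 0 := by
  intro s hsub
  apply pv_int_ext
  intro i
  have hai := congrArg (fun x => x.testBit i) ha
  simp only [pv_testBit_band] at hai
  have hsi := congrArg (fun x => x.testBit i) hsub
  simp only [pv_testBit_band, pv_testBit_not] at hsi
  simp only [pv_testBit_band, pv_testBit_zero_int]
  revert hai hsi
  cases a.testBit i <;> cases target.testBit i <;> cases s.testBit i <;>
    cases mask.testBit i <;> simp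

theorem pv_valid_iff (a target mask b : Int) (ha : PySem.Int.band a target = target) :
    (∃ s, PySem.Int.band s (PySem.Int.band (Int.not a) mask) = s ∧
          b = PySem.Int.bor target s) ↔
    (PySem.Int.band b a = target ∧ PySem.Int.bor b mask = PySem.Int.bor target mask) := by
  constructor
  · rintro ⟨s, hsub, rfl⟩
    constructor
    · apply pv_int_ext
      intro i
      have hai := congrArg (fun x => x.testBit i) ha
      simp only [pv_testBit_band] at hai
      have hsi := congrArg (fun x => x.testBit i) hsub
      simp only [pv_testBit_band, pv_testBit_not] at hsi
      simp only [pv_testBit_band, pv_testBit_bor]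
      revert hai hsi
      cases a.testBit i <;> cases target.testBit i <;> cases s.testBit i <;>
        cases mask.testBit i <;> simp
    · apply pv_int_ext
      intro i
      have hsi := congrArg (fun x => x.testBit i) hsub
      simp only [pv_testBit_band, pv_testBit_not] at hsi
      simp only [pv_testBit_bor]
      revert hsi
      cases target.testBit i <;> cases s.testBit i <;> cases mask.testBit i <;> simp
  · rintro ⟨h1, h2⟩
    refine ⟨PySem.Int.band b (Int.not target), ?_, ?_⟩
    · apply pv_int_ext
      intro i
      have h1i := congrArg (fun x => x.testBit i) h1
      simp only [pv_testBit_band] at h1i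
      have h2i := congrArg (fun x => x.testBit i) h2
      simp only [pv_testBit_bor] at h2i
      simp only [pv_testBit_band, pv_testBit_not]
      revert h1i h2i
      cases a.testBit i <;> cases target.testBit i <;> cases b.testBit i <;>
        cases mask.testBit i <;> simp
    · apply pv_int_ext
      intro i
      have h1i := congrArg (fun x => x.testBit i) h1
      simp only [pv_testBit_band] at h1i
      simp only [pv_testBit_bor, pv_testBit_band, pv_testBit_not]
      revert h1i
      cases target.testBit i <;> cases b.testBit i <;> cases a.testBit i <;> simp



-- the sequence of b-candidates the submask walk visits (proof-side skeleton of pvSubLoopF)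
def pvBSF (d : PySem.Dict Int Int) (target free : Int) : Nat → Int → List Int
  | 0, _ => []
  | Nat.succ n, s =>
    (if d.contains (PySem.Int.bor target s) then [PySem.Int.bor target s] else []) ++
    (if s = free then []
     else pvBSF d target free n (PySem.Int.band (s - free) free))

theorem pvSubLoopF_eq (d : PySem.Dict Int Int) (is_nand : Bool) (target a_tt opt_a free : Int)
    (hf : 0 ≤ free) :
    ∀ fuel s acc, PySem.Int.band s free = s → (free - s).toNat < fuel →
      pvSubLoopF d is_nand target a_tt opt_a free fuel s acc =
        acc ++ (pvBSF d target free fuel s).map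
          (fun b => (a_tt, b, opt_a, d.getD b 0, 1 + opt_a + d.getD b 0, is_nand)) := by
  intro fuel
  induction fuel with
  | zero => intro s acc _ h; omega
  | succ n ih =>
  intro s acc hs hn
  show (if s = free then _ else pvSubLoopF d is_nand target a_tt opt_a free n
          (PySem.Int.band (s - free) free) _) = _
  rw [pvBSF]
  by_cases h : s = free
  · rw [if_pos h, if_pos h]
    by_cases hc : d.contains (PySem.Int.bor target s) <;> simp [hc]
  · rw [if_neg h, if_neg h]
    obtain ⟨h1, h2, h3, _⟩ := pv_succ free s hf hs h
    have h0 := (pv_subset_bounds s free hf hs).1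
    rw [ih _ _ h1 (by omega)]
    by_cases hc : d.contains (PySem.Int.bor target s) <;> simp [hc]

theorem pvBSF_mem (d : PySem.Dict Int Int) (target free : Int) (hf : 0 ≤ free) :
    ∀ fuel s, PySem.Int.band s free = s → (free - s).toNat < fuel → ∀ x,
      (x ∈ pvBSF d target free fuel s ↔
        ∃ t, PySem.Int.band t free = t ∧ s ≤ t ∧ x = PySem.Int.bor target t ∧
          d.contains x = true) := by
  intro fuel
  induction fuel with
  | zero => intro s _ h; omega
  | succ n ih =>
  intro s hs hn x
  rw [pvBSF]
  constructor
  · intro hx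
    rw [List.mem_append] at hx
    rcases hx with hx | hx
    · by_cases hc : d.contains (PySem.Int.bor target s)
      · rw [if_pos hc, List.mem_singleton] at hx
        exact ⟨s, hs, le_refl s, hx, hx ▸ hc⟩
      · rw [if_neg hc] at hx
        simp at hx
    · by_cases h : s = free
      · rw [if_pos h] at hx
        simp at hx
      · rw [if_neg h] at hx
        obtain ⟨h1, h2, h3, _⟩ := pv_succ free s hf hs h
        have h0 := (pv_subset_bounds s free hf hs).1
        obtain ⟨t, ht1, ht2, ht3, ht4⟩ := (ih _ h1 (by omega) x).mp hx
        exact ⟨t, ht1, by omega, ht3, ht4⟩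
  · rintro ⟨t, ht1, ht2, rfl, ht4⟩
    rw [List.mem_append]
    by_cases hts : t = s
    · subst hts
      left
      rw [if_pos ht4]
      exact List.mem_singleton.mpr rfl
    · have hlt : s < t := lt_of_le_of_ne ht2 (fun h => hts h.symm)
      have h : s ≠ free := by
        intro heq
        have := (pv_subset_bounds t free hf ht1).2
        omega
      right
      rw [if_neg h]
      obtain ⟨h1, h2, h3, hmin⟩ := pv_succ free s hf hs h
      have h0 := (pv_subset_bounds s free hf hs).1
      exact (ih _ h1 (by omega) _).mpr ⟨t, ht1, hmin t ht1 hlt, rfl, ht4⟩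

theorem pvBSF_pairwise (d : PySem.Dict Int Int) (target free : Int) (hf : 0 ≤ free)
    (hdisj : ∀ t, PySem.Int.band t free = t → PySem.Int.band target t = 0) :
    ∀ fuel s, PySem.Int.band s free = s → (free - s).toNat < fuel →
      (pvBSF d target free fuel s).Pairwise (· < ·) := by
  intro fuel
  induction fuel with
  | zero => intro s _ h; omega
  | succ n ih =>
  intro s hs hn
  rw [pvBSF]
  by_cases h : s = free
  · rw [if_pos h]
    by_cases hc : d.contains (PySem.Int.bor target s) <;> simp [hc]
  · rw [if_neg h]
    obtain ⟨h1, h2, h3, _⟩ := pv_succ free s hf hs h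
    have h0 := (pv_subset_bounds s free hf hs).1
    have htail := ih _ h1 (by omega)
    apply List.pairwise_append.mpr
    refine ⟨?_, htail, ?_⟩
    · by_cases hc : d.contains (PySem.Int.bor target s) <;> simp [hc]
    · intro x hx y hy
      by_cases hc : d.contains (PySem.Int.bor target s)
      · rw [if_pos hc, List.mem_singleton] at hx
        subst hx
        obtain ⟨t, ht1, ht2, rfl, _⟩ := (pvBSF_mem d target free hf n _ h1 (by omega) y).mp hy
        have hds := hdisj s hs
        have hdt := hdisj t ht1
        have hs0 := (pv_subset_bounds s free hf hs).1
        have ht0 := (pv_subset_bounds t free hf ht1).1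
        rw [pv_bor_add target s hs0 hds, pv_bor_add target t ht0 hdt]
        omega
      · rw [if_neg hc] at hx
        simp at hx

theorem pv_sorted_unique : ∀ (l1 l2 : List Int), l1.Pairwise (· < ·) → l2.Pairwise (· < ·) →
    (∀ x, x ∈ l1 ↔ x ∈ l2) → l1 = l2 := by
  intro l1
  induction l1 with
  | nil =>
    intro l2 _ _ hmem
    cases l2 with
    | nil => rfl
    | cons b t2 => exact absurd ((hmem b).mpr (List.mem_cons_self)) (List.not_mem_nil)
  | cons a t1 ih =>
    intro l2 hp1 hp2 hmem
    cases l2 with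
    | nil => exact absurd ((hmem a).mp (List.mem_cons_self)) (List.not_mem_nil)
    | cons b t2 =>
      obtain ⟨ha1, hpt1⟩ := List.pairwise_cons.mp hp1
      obtain ⟨hb2, hpt2⟩ := List.pairwise_cons.mp hp2
      have hab : a = b := by
        have h1 := (hmem a).mp (List.mem_cons_self)
        have h2 := (hmem b).mpr (List.mem_cons_self)
        rcases List.mem_cons.mp h1 with h | h
        · exact h
        · rcases List.mem_cons.mp h2 with h' | h'
          · exact h'.symm
          · have := ha1 b h'
            have := hb2 a h
            omega
      subst hab
      have htl : t1 = t2 := by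
        apply ih _ hpt1 hpt2
        intro x
        constructor
        · intro hx
          have hxl2 := (hmem x).mp (List.mem_cons_of_mem a hx)
          rcases List.mem_cons.mp hxl2 with h | h
          · exact absurd h (by have := ha1 x hx; omega)
          · exact h
        · intro hx
          have hxl1 := (hmem x).mpr (List.mem_cons_of_mem a hx)
          rcases List.mem_cons.mp hxl1 with h | h
          · exact absurd h (by have := hb2 x hx; omega)
          · exact h
      rw [htl]



theorem pv_bs0_eq_filter (d : PySem.Dict Int Int) (hnd : d.keys.Nodup)
    (mask target a : Int) (hm : 0 ≤ mask) (ha : PySem.Int.band a target = target) :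
    pvBSF d target (PySem.Int.band (Int.not a) mask)
        ((PySem.Int.band (Int.not a) mask).toNat + 1) 0 =
      (PySem.List.sorted d.keys (fun x => x) false).filter
        (fun b => PySem.Int.band b a == target &&
                  PySem.Int.bor b mask == PySem.Int.bor target mask) := by
  have hf : 0 ≤ PySem.Int.band (Int.not a) mask := pv_band_nonneg_right _ _ hm
  have h0 : PySem.Int.band 0 (PySem.Int.band (Int.not a) mask) = 0 := pv_band_zero_left _
  have hfuel : ((PySem.Int.band (Int.not a) mask) - 0).toNat <
      (PySem.Int.band (Int.not a) mask).toNat + 1 := by omega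
  apply pv_sorted_unique
  · exact pvBSF_pairwise d target _ hf (pv_target_disj a target mask ha) _ 0 h0 hfuel
  · have hsp : (PySem.List.sorted d.keys (fun x => x) false).Pairwise (· ≤ ·) := by
      have := PySem.List.sorted_pairwise d.keys (fun x => x)
      simpa using this
    have hsnd : (PySem.List.sorted d.keys (fun x => x) false).Nodup :=
      (PySem.List.sorted_perm d.keys (fun x => x) false).nodup_iff.mpr hnd
    have hslt : (PySem.List.sorted d.keys (fun x => x) false).Pairwise (· < ·) := by
      have hand := List.Pairwise.and hsp hsnd
      exact hand.imp (fun h => lt_of_le_of_ne h.1 h.2)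
    exact hslt.filter _
  · intro x
    rw [pvBSF_mem d target _ hf _ 0 h0 hfuel x, List.mem_filter]
    have hv := pv_valid_iff a target mask x ha
    constructor
    · rintro ⟨t, ht1, _, rfl, hc⟩
      refine ⟨?_, ?_⟩
      · rw [PySem.List.mem_sorted]
        exact (PySem.Dict.contains_iff_mem_keys d _).mp hc
      · simp only [Bool.and_eq_true, beq_iff_eq]
        exact hv.mp ⟨t, ht1, rfl⟩
    · rintro ⟨hmem, hpred⟩
      simp only [Bool.and_eq_true, beq_iff_eq] at hpred
      obtain ⟨t, ht1, hx⟩ := hv.mpr hpred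
      have ht0 := (pv_subset_bounds t _ hf ht1).1
      refine ⟨t, ht1, ht0, hx, ?_⟩
      rw [PySem.Dict.contains_iff_mem_keys]
      exact (PySem.List.mem_sorted d.keys (fun x => x) false x).mp hmem

theorem pv_core (d : PySem.Dict Int Int) (hnd : d.keys.Nodup) (is_nand : Bool)
    (mask target a opt_a : Int) (hm : 0 ≤ mask) (ha : PySem.Int.band a target = target)
    (acc : List (Int × Int × Int × Int × Int × Bool)) :
    pvSubLoopF d is_nand target a opt_a (PySem.Int.band (Int.not a) mask)
        ((PySem.Int.band (Int.not a) mask).toNat + 1) 0 acc =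
      acc ++ ((PySem.List.sorted d.keys (fun x => x) false).filter
        (fun b => PySem.Int.band b a == target &&
                  PySem.Int.bor b mask == PySem.Int.bor target mask)).map
        (fun b => (a, b, opt_a, d.getD b 0, 1 + opt_a + d.getD b 0, is_nand)) := by
  have hf : 0 ≤ PySem.Int.band (Int.not a) mask := pv_band_nonneg_right _ _ hm
  rw [pvSubLoopF_eq d is_nand target a opt_a _ hf _ 0 acc (pv_band_zero_left _) (by omega)]
  rw [pv_bs0_eq_filter d hnd mask target a hm ha]

theorem pv_map_foldl_blocks {α T1 T2 : Type} (proj : T1 → T2) (c : α → Prop)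
    [DecidablePred c] (g : α → List T1) :
    ∀ (l : List α) (dec : List T1),
      (l.foldl (fun dec p => if c p then dec ++ g p else dec) dec).map proj =
      l.foldl (fun acc p => if c p then acc ++ (g p).map proj else acc) (dec.map proj) := by
  intro l
  induction l with
  | nil => intro dec; rfl
  | cons p t ih =>
    intro dec
    rw [List.foldl_cons, List.foldl_cons, ih]
    by_cases hc : c p
    · rw [if_pos hc, if_pos hc, List.map_append]
    · rw [if_neg hc, if_neg hc]


theorem pv_main (n_inputs : Int) (opt_data : List (Int × Int)) :
    tropical_transition_matrix n_inputs opt_data =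
      tropical_transition_matrix_alt n_inputs opt_data := by
  dsimp only [tropical_transition_matrix, tropical_transition_matrix_alt, pvAllAndDecomps]
  have hnd := PySem.Dict.nodup_keys_ofList (κ := Int) (ν := Int) opt_data
  congr 1
  apply List.foldl_ext
  intro tr f hfmem
  congr 1
  simp only [ne_eq, ite_not]
  rw [List.foldl_cons, List.foldl_cons, List.foldl_nil,
      List.foldl_cons, List.foldl_cons, List.foldl_nil]
  simp only [Bool.false_eq_true, if_false, if_true]
  set d := PySem.Dict.ofList opt_data with hd
  have hstep : ∀ (nand : Bool) (target : Int)
      (dec : List (Int × Int × Int × Int × Int × Bool)),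
      d.items.foldl (fun dec p =>
        if PySem.Int.band p.1 target = target
        then pvSubLoopF d nand target p.1 p.2 (PySem.Int.band (Int.not p.1) (pvMaskOf n_inputs))
          ((PySem.Int.band (Int.not p.1) (pvMaskOf n_inputs)).toNat + 1) 0 dec
        else dec) dec =
      d.items.foldl (fun dec p =>
        if PySem.Int.band p.1 target = target then dec ++
          ((PySem.List.sorted d.keys (fun x => x) false).filter
            (fun b => PySem.Int.band b p.1 == target &&
                      PySem.Int.bor b (pvMaskOf n_inputs) == PySem.Int.bor target (pvMaskOf n_inputs))).map
            (fun b => (p.1, b, p.2, d.getD b 0, 1 + p.2 + d.getD b 0, nand))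
        else dec) dec := by
    intro nand target dec
    apply List.foldl_ext
    intro dec p hp
    split_ifs with hc
    · exact pv_core d hnd nand (pvMaskOf n_inputs) target p.1 p.2 (pvMaskOf_nonneg n_inputs) hc dec
    · rfl
  rw [hstep false f, hstep true (PySem.Int.bxor f (pvMaskOf n_inputs))]
  rw [pv_map_foldl_blocks (fun e => (e.1, e.2.1, e.2.2.2.2.1))
        (fun p => PySem.Int.band p.1 (PySem.Int.bxor f (pvMaskOf n_inputs)) = PySem.Int.bxor f (pvMaskOf n_inputs))
        (fun p => ((PySem.List.sorted d.keys (fun x => x) false).filter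
            (fun b => PySem.Int.band b p.1 == PySem.Int.bxor f (pvMaskOf n_inputs) &&
                      PySem.Int.bor b (pvMaskOf n_inputs) ==
                        PySem.Int.bor (PySem.Int.bxor f (pvMaskOf n_inputs)) (pvMaskOf n_inputs))).map
            (fun b => (p.1, b, p.2, d.getD b 0, 1 + p.2 + d.getD b 0, true)))
        d.items]
  rw [pv_map_foldl_blocks (fun e => (e.1, e.2.1, e.2.2.2.2.1))
        (fun p => PySem.Int.band p.1 f = f)
        (fun p => ((PySem.List.sorted d.keys (fun x => x) false).filter
            (fun b => PySem.Int.band b p.1 == f &&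
                      PySem.Int.bor b (pvMaskOf n_inputs) == PySem.Int.bor f (pvMaskOf n_inputs))).map
            (fun b => (p.1, b, p.2, d.getD b 0, 1 + p.2 + d.getD b 0, false)))
        d.items]
  simp only [PySem.List.foldl_append_if, List.map_map, List.map_nil]
  rfl

-- ===== VERDICT (by name: the statement is the Claim_ definition above) =====
theorem tropical_transition_matrix_spec : Claim_equal_tropical_transition_matrix := by
  intro n_inputs opt_data _ _
  unfold Spec_tropical_transition_matrix
  exact pv_main n_inputs opt_data
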